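-- pv_equiv track=rewrite | github.com/mohitkumhar/leetcode_solution | 3707. Equal Score Substrings.py | scoreBalance
-- ===== SOURCE A (Python) =====
-- def scoreBalance(s: str) -> bool:
--     def helper(left_str, right_str):
--         left_count = 0
--         right_count = 0
--
--         for char in left_str:
--             temp = ord(char) - 96
--             left_count += temp
--         for char in right_str:
--             temp = ord(char) - 96
--             right_count += temp
--         return left_count, right_count
--
--     s = list(s)
--     for i in range(len(s)-1):
--         left, right = helper(s[:i+1], s[i+1:])
--         if left == right:
--             return True
--     return False
-- ===== SOURCE B (Python) =====
-- def scoreBalance(s: str) -> bool: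
--     total = sum(ord(c) - 96 for c in s)
--     pref = 0
--     for c in s[:-1]:
--         pref += ord(c) - 96
--         if 2 * pref == total:
--             return True
--     return False
-- ===== Notes on version B (the rewrite author's own statement) =====
-- stated objective: faster
-- what changed: Replaced the quadratic rescan of both slices at every split point by one total-sum pass plus a single running-prefix pass comparing 2*prefix to the total.
import Mathlib
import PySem

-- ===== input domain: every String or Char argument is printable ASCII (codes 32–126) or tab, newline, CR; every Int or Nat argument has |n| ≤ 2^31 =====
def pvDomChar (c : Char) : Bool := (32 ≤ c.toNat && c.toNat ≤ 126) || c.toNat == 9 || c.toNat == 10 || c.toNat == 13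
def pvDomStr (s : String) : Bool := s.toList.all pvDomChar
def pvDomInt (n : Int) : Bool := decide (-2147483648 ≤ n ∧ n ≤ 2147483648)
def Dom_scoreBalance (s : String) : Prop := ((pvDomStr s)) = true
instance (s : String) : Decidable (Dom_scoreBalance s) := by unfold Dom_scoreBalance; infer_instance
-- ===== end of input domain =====

-- B replaces A's rescan of both slices at every split point by one total sum plus a running prefix compared to total (objective: faster).

-- ===== PORT A =====
-- helper(left_str, right_str): two accumulator loops, returned as a pair
def pvHelper (left_str right_str : List Char) : Int × Int :=
  (left_str.foldl (fun acc c => acc + ((c.toNat : Int) - 96)) 0,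
   right_str.foldl (fun acc c => acc + ((c.toNat : Int) - 96)) 0)

-- the 'for i in range(len(s)-1)' loop with early return
def pvALoop (s : List Char) : List Int → Bool
  | [] => false
  | i :: rest =>
    let lr := pvHelper (PySem.List.slice s none (some (i + 1))) (PySem.List.slice s (some (i + 1)) none)
    if lr.1 == lr.2 then true else pvALoop s rest

def scoreBalance (s : String) : Bool :=
  pvALoop s.toList (PySem.List.pyRange 0 ((s.toList.length : Int) - 1) 1)

-- ===== PORT B =====
-- the 'for c in s[:-1]' loop carrying the running prefix, with early return
def pvBLoop (total : Int) : Int → List Char → Bool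
  | _, [] => false
  | pref, c :: rest =>
    let pref' := pref + ((c.toNat : Int) - 96)
    if 2 * pref' == total then true else pvBLoop total pref' rest

def scoreBalance_alt (s : String) : Bool :=
  let total := (s.toList.map (fun c => ((c.toNat : Int) - 96))).sum
  pvBLoop total 0 (PySem.List.slice s.toList none (some (-1)))

-- ===== PRECONDITION & SPEC =====
def Spec_scoreBalance (s : String) (out : Bool) : Prop := out = scoreBalance_alt s
instance (s : String) (out : Bool) : Decidable (Spec_scoreBalance s out) := by unfold Spec_scoreBalance; infer_instance

-- ===== CLAIM (what is proved, stated in full; the proofs are below) =====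
def Claim_equal_scoreBalance : Prop := ∀ (s : String), Dom_scoreBalance s → Spec_scoreBalance s (scoreBalance s)

-- ===== LEMMAS AND PROOFS =====

def pvScore (c : Char) : Int := (c.toNat : Int) - 96

theorem pv_foldl_score (l : List Char) (a : Int) :
    l.foldl (fun acc c => acc + ((c.toNat : Int) - 96)) a = a + (l.map pvScore).sum := by
  induction l generalizing a with
  | nil => simp
  | cons c t ih => simp [List.foldl, ih, pvScore]; ring

theorem pv_any_congr {α : Type} (l : List α) (p q : α → Bool)
    (h : ∀ x ∈ l, p x = q x) : l.any p = l.any q := by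
  induction l with
  | nil => rfl
  | cons x t ih =>
    simp only [List.any_cons, h x (by simp), ih (fun y hy => h y (by simp [hy]))]

theorem pvALoop_any (s : List Char) (idxs : List Int) :
    pvALoop s idxs = idxs.any (fun i =>
      ((PySem.List.slice s none (some (i + 1))).map pvScore).sum ==
      ((PySem.List.slice s (some (i + 1)) none).map pvScore).sum) := by
  induction idxs with
  | nil => rfl
  | cons i rest ih =>
    simp only [pvALoop, pvHelper, List.any_cons, pv_foldl_score, zero_add]
    split_ifs with h <;> simp [h, ih]

theorem pvBLoop_any (total : Int) (l : List Char) (pref : Int) :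
    pvBLoop total pref l = (List.range l.length).any (fun k =>
      2 * (pref + ((l.take (k + 1)).map pvScore).sum) == total) := by
  induction l generalizing pref with
  | nil => rfl
  | cons c t ih =>
    simp only [pvBLoop, List.length_cons, List.range_succ_eq_map, List.any_cons, List.any_map]
    split_ifs with h
    · simp [pvScore, h]
    · have : (2 * (pref + ((List.take 1 (c :: t)).map pvScore).sum) == total) = false := by
        simpa [pvScore] using h
      rw [ih (pref + ((c.toNat : Int) - 96))]
      simp only [this, Bool.false_or]
      apply pv_any_congr
      intro k _
      simp [Function.comp, List.take_succ_cons, pvScore, add_assoc]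

theorem pv_split_sum (s : List Char) (k : Nat) :
    (s.map pvScore).sum =
      ((s.take k).map pvScore).sum + ((s.drop k).map pvScore).sum := by
  conv_lhs => rw [← List.take_append_drop k s]
  simp

theorem scoreBalance_eq (s : String) : scoreBalance s = scoreBalance_alt s := by
  unfold scoreBalance scoreBalance_alt
  set l := s.toList with hl
  rw [pvALoop_any, PySem.List.slice_to_neg_one, pvBLoop_any,
      PySem.List.pyRange_one, List.any_map]
  have hlen : l.dropLast.length = l.length - 1 := by simp
  rw [hlen]
  have hn : ((l.length : Int) - 1 - 0).toNat = l.length - 1 := by omega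
  rw [hn]
  apply pv_any_congr
  intro k hk
  simp only [List.mem_range] at hk
  simp only [Function.comp_apply]
  have hcast : (0 : Int) + (k : Int) + 1 = ((k + 1 : Nat) : Int) := by push_cast; ring
  rw [hcast, PySem.List.slice_to_natCast, PySem.List.slice_from_natCast]
  have htake : l.dropLast.take (k + 1) = l.take (k + 1) := by
    rw [List.dropLast_eq_take, List.take_take]
    congr 1; omega
  rw [htake, zero_add]
  have hsplit := pv_split_sum l (k + 1)
  simp only [List.map_take, List.map_drop] at hsplit ⊢
  rw [show (List.map (fun c => ((c.toNat : Int) - 96)) l) = List.map pvScore l from rfl, hsplit, Bool.eq_iff_iff]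
  simp only [beq_iff_eq]
  omega

-- ===== VERDICT (by name: the statement is the Claim_ definition above) =====
theorem scoreBalance_spec : Claim_equal_scoreBalance := by
  intro s _
  unfold Spec_scoreBalance
  exact scoreBalance_eq s
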